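-- pv_equiv track=rewrite | github.com/dianaiusan/di-training-repo | scripts/maintenance/add_course_dates.py | set_or_insert_dates
-- ===== SOURCE A (Python) =====
-- def get_value(line: str) -> str:
--     """Read YAML scalar value from a simple key: value line."""
--     if ":" not in line:
--         return ""
--     raw = line.split(":", 1)[1].strip()
--     if raw.startswith('"') and raw.endswith('"'):
--         return raw[1:-1]
--     if raw.startswith("'") and raw.endswith("'"):
--         return raw[1:-1]
--     return raw
--
-- def set_or_insert_dates(fm_text: str, start_iso: str, end_iso: str) -> str:
--     """Ensure start_date and end_date keys exist and are populated when possible."""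
--     lines = fm_text.splitlines()
--     start_idx = next((i for i, ln in enumerate(lines) if ln.strip().startswith("start_date:")), None)
--     end_idx = next((i for i, ln in enumerate(lines) if ln.strip().startswith("end_date:")), None)
--
--     def fmt(value: str) -> str:
--         return f'"{value}"' if value else '""'
--
--     if start_idx is not None:
--         current = get_value(lines[start_idx])
--         if not current and start_iso:
--             lines[start_idx] = f"start_date: {fmt(start_iso)}"
--     if end_idx is not None:
--         current = get_value(lines[end_idx])
--         if not current and end_iso:
--             lines[end_idx] = f"end_date: {fmt(end_iso)}"
--
--     insert_at = None
--     for key in ("duration:", "format:", "status:"):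
--         idx = next((i for i, ln in enumerate(lines) if ln.strip().startswith(key)), None)
--         if idx is not None:
--             insert_at = idx + 1
--             break
--     if insert_at is None:
--         insert_at = len(lines)
--
--     if start_idx is None:
--         lines.insert(insert_at, f"start_date: {fmt(start_iso)}")
--         insert_at += 1
--     if end_idx is None:
--         lines.insert(insert_at, f"end_date: {fmt(end_iso)}")
--
--     return "\n".join(lines)
-- ===== SOURCE B (Python) =====
-- KEYS = ("start_date:", "end_date:", "duration:", "format:", "status:")
--
-- def get_value(line: str) -> str:
--     """Read YAML scalar value from a simple key: value line."""
--     if ":" not in line: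
--         return ""
--     raw = line.split(":", 1)[1].strip()
--     if raw.startswith('"') and raw.endswith('"'):
--         return raw[1:-1]
--     if raw.startswith("'") and raw.endswith("'"):
--         return raw[1:-1]
--     return raw
--
-- def set_or_insert_dates(fm_text: str, start_iso: str, end_iso: str) -> str:
--     """Ensure start_date and end_date keys exist and are populated when possible."""
--     lines = fm_text.splitlines()
--     # one pass: first-occurrence index of each relevant key prefix
--     pos = {}
--     for i, ln in enumerate(lines):
--         s = ln.strip()
--         for key in KEYS:
--             if key not in pos and s.startswith(key):
--                 pos[key] = i
--
--     def fmt(value: str) -> str: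
--         return f'"{value}"'
--
--     start_idx = pos.get("start_date:")
--     end_idx = pos.get("end_date:")
--     if start_idx is not None and start_iso and not get_value(lines[start_idx]):
--         lines[start_idx] = f"start_date: {fmt(start_iso)}"
--     if end_idx is not None and end_iso and not get_value(lines[end_idx]):
--         lines[end_idx] = f"end_date: {fmt(end_iso)}"
--
--     anchor = next((pos[k] + 1 for k in ("duration:", "format:", "status:") if k in pos), len(lines))
--     new_lines = []
--     if start_idx is None:
--         new_lines.append(f"start_date: {fmt(start_iso)}")
--     if end_idx is None:
--         new_lines.append(f"end_date: {fmt(end_iso)}")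
--     return "\n".join(lines[:anchor] + new_lines + lines[anchor:])
-- ===== Notes on version B (the rewrite author's own statement) =====
-- stated objective: simpler
-- what changed: One enumerate pass builds a first-occurrence index dict for all five key prefixes, replacing A's five separate next() scans, and the two inserts with the insert_at += 1 bump are replaced by a single slice concatenation lines[:anchor] + new_lines + lines[anchor:].
import Mathlib
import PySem

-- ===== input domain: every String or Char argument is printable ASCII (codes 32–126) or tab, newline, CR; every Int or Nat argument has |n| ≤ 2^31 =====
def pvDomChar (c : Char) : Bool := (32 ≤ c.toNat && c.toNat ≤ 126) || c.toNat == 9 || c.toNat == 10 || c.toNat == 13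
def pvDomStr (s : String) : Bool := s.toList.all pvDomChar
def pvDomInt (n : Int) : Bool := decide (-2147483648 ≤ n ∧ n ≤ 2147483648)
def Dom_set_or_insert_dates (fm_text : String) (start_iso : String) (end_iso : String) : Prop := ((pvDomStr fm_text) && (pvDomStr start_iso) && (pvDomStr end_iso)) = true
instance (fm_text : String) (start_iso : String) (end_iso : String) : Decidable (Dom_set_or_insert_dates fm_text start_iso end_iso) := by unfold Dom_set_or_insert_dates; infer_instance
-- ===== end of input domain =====

-- B replaces A's five separate next() scans by one indexing pass that records the first
-- occurrence of each key prefix, and replaces the two sequential list.insert calls (with the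
-- insert_at += 1 bump) by a single slice concatenation; objective: simpler.

-- ===== PORT A =====
-- helper of the module, used by A (and by B, Source B carries the same helper)
def get_value (line : String) : String :=
  if PySem.Str.isIn ":" line = false then ""
  else
    let raw := PySem.Str.strip (((PySem.Str.splitMax? line ":" 1).getD []).getD 1 "")
    if PySem.Str.startswith raw "\"" && PySem.Str.endswith raw "\"" then
      PySem.Str.slice raw (some 1) (some (-1))
    else if PySem.Str.startswith raw "'" && PySem.Str.endswith raw "'" then
      PySem.Str.slice raw (some 1) (some (-1))
    else raw

-- A's nested fmt: f'"{value}"' if value else '""'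
def pvFmtA (v : String) : String :=
  if v ≠ "" then PySem.Str.join "" ["\"", v, "\""] else "\"\""

def set_or_insert_dates (fm_text : String) (start_iso : String) (end_iso : String) : String :=
  let lines := PySem.Str.splitlines fm_text
  let start_idx := lines.findIdx? (fun ln => PySem.Str.startswith (PySem.Str.strip ln) "start_date:")
  let end_idx := lines.findIdx? (fun ln => PySem.Str.startswith (PySem.Str.strip ln) "end_date:")
  let lines1 :=
    match start_idx with
    | some i =>
        if get_value (lines.getD i "") = "" ∧ start_iso ≠ "" then
          lines.set i (PySem.Str.join "" ["start_date: ", pvFmtA start_iso])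
        else lines
    | none => lines
  let lines2 :=
    match end_idx with
    | some i =>
        if get_value (lines1.getD i "") = "" ∧ end_iso ≠ "" then
          lines1.set i (PySem.Str.join "" ["end_date: ", pvFmtA end_iso])
        else lines1
    | none => lines1
  let insert_at : Nat :=
    match lines2.findIdx? (fun ln => PySem.Str.startswith (PySem.Str.strip ln) "duration:") with
    | some i => i + 1
    | none =>
      match lines2.findIdx? (fun ln => PySem.Str.startswith (PySem.Str.strip ln) "format:") with
      | some i => i + 1
      | none =>
        match lines2.findIdx? (fun ln => PySem.Str.startswith (PySem.Str.strip ln) "status:") with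
        | some i => i + 1
        | none => lines2.length
  match start_idx, end_idx with
  | none, none =>
      PySem.Str.join "\n"
        (PySem.List.insert
          (PySem.List.insert lines2 (insert_at : Int) (PySem.Str.join "" ["start_date: ", pvFmtA start_iso]))
          (↑(insert_at + 1)) (PySem.Str.join "" ["end_date: ", pvFmtA end_iso]))
  | none, some _ =>
      PySem.Str.join "\n" (PySem.List.insert lines2 (insert_at : Int) (PySem.Str.join "" ["start_date: ", pvFmtA start_iso]))
  | some _, none =>
      PySem.Str.join "\n" (PySem.List.insert lines2 (insert_at : Int) (PySem.Str.join "" ["end_date: ", pvFmtA end_iso]))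
  | some _, some _ => PySem.Str.join "\n" lines2

-- ===== PORT B =====
def pvKeys : List String := ["start_date:", "end_date:", "duration:", "format:", "status:"]

-- B's fmt: f'"{value}"'
def pvFmtB (v : String) : String := PySem.Str.join "" ["\"", v, "\""]

def set_or_insert_dates_alt (fm_text : String) (start_iso : String) (end_iso : String) : String :=
  let lines := PySem.Str.splitlines fm_text
  let pos : PySem.Dict String Nat :=
    lines.zipIdx.foldl (fun d p =>
      pvKeys.foldl (fun d key =>
        if !(d.contains key) && PySem.Str.startswith (PySem.Str.strip p.1) key then d.insert key p.2 else d) d)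
      PySem.Dict.empty
  let start_idx := pos.get? "start_date:"
  let end_idx := pos.get? "end_date:"
  let lines1 :=
    match start_idx with
    | some i =>
        if start_iso ≠ "" ∧ get_value (lines.getD i "") = "" then
          lines.set i (PySem.Str.join "" ["start_date: ", pvFmtB start_iso])
        else lines
    | none => lines
  let lines2 :=
    match end_idx with
    | some i =>
        if end_iso ≠ "" ∧ get_value (lines1.getD i "") = "" then
          lines1.set i (PySem.Str.join "" ["end_date: ", pvFmtB end_iso])
        else lines1
    | none => lines1
  let anchor :=
    match pos.get? "duration:" with
    | some i => i + 1
    | none =>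
      match pos.get? "format:" with
      | some i => i + 1
      | none =>
        match pos.get? "status:" with
        | some i => i + 1
        | none => lines2.length
  let new_lines : List String := []
  let new_lines := if start_idx = none then new_lines ++ [PySem.Str.join "" ["start_date: ", pvFmtB start_iso]] else new_lines
  let new_lines := if end_idx = none then new_lines ++ [PySem.Str.join "" ["end_date: ", pvFmtB end_iso]] else new_lines
  PySem.Str.join "\n" (List.take anchor lines2 ++ new_lines ++ List.drop anchor lines2)

-- ===== PRECONDITION & SPEC =====
def Spec_set_or_insert_dates (fm_text : String) (start_iso : String) (end_iso : String) (out : String) : Prop := out = set_or_insert_dates_alt fm_text start_iso end_iso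
instance (fm_text : String) (start_iso : String) (end_iso : String) (out : String) : Decidable (Spec_set_or_insert_dates fm_text start_iso end_iso out) := by unfold Spec_set_or_insert_dates; infer_instance

-- ===== CLAIM (what is proved, stated in full; the proofs are below) =====
def Claim_equal_set_or_insert_dates : Prop := ∀ (fm_text : String) (start_iso : String) (end_iso : String), Dom_set_or_insert_dates fm_text start_iso end_iso → Spec_set_or_insert_dates fm_text start_iso end_iso (set_or_insert_dates fm_text start_iso end_iso)

-- ===== LEMMAS AND PROOFS =====

-- the scan predicate both programs test
def pvP (k : String) (ln : String) : Bool := PySem.Str.startswith (PySem.Str.strip ln) k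

theorem pvFmt_eq (v : String) : pvFmtA v = pvFmtB v := by
  by_cases h : v = ""
  · subst h; decide
  · simp [pvFmtA, pvFmtB, h]

-- two incomparable prefixes cannot both start the same string
theorem pvExcl (a b ln : String) (hab : ¬ (a.toList <+: b.toList)) (hba : ¬ (b.toList <+: a.toList)) :
    pvP a ln = true → pvP b ln = false := by
  intro ha
  by_contra hb
  rw [Bool.not_eq_false] at hb
  unfold pvP PySem.Str.startswith at ha hb
  rw [PySem.Chars.startswith_iff] at ha hb
  rcases List.prefix_or_prefix_of_prefix ha hb with h | h
  · exact hab h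
  · exact hba h

theorem pvStripEnds (a : Char) (mid : List Char) (b : Char)
    (ha : PySem.Chars.isspace a = false) (hb : PySem.Chars.isspace b = false) :
    PySem.Chars.strip (a :: (mid ++ [b])) = a :: (mid ++ [b]) := by
  unfold PySem.Chars.strip PySem.Chars.lstrip PySem.Chars.rstrip
  have h1 : List.dropWhile PySem.Chars.isspace (a :: (mid ++ [b])) = a :: (mid ++ [b]) := by
    rw [List.dropWhile_cons, ha]; simp
  rw [h1]
  have h2 : (a :: (mid ++ [b])).reverse = b :: (mid.reverse ++ [a]) := by simp
  rw [h2, List.dropWhile_cons, hb]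
  simp

-- the freshly written "key: \"…\"" line still starts (after strip) with its own key
theorem pvP_new (k kw v : String) (a : Char) (rest : List Char)
    (hkw : kw.toList = a :: rest) (ha : PySem.Chars.isspace a = false)
    (hpre : k.toList <+: kw.toList) :
    pvP k (PySem.Str.join "" [kw, pvFmtB v]) = true := by
  unfold pvP PySem.Str.startswith
  rw [PySem.Str.toList_strip, PySem.Str.toList_join]
  have hfmt : (pvFmtB v).toList = '"' :: (v.toList ++ ['"']) := by
    unfold pvFmtB
    rw [PySem.Str.toList_join]
    simp only [List.map_cons, List.map_nil]
    rw [show ("\"" : String).toList = ['"'] from rfl, show ("" : String).toList = [] from rfl]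
    rw [PySem.Chars.join_cons_cons, PySem.Chars.join_cons_cons, PySem.Chars.join_singleton]
    simp
  simp only [List.map_cons, List.map_nil, hfmt]
  rw [show ("" : String).toList = [] from rfl]
  rw [PySem.Chars.join_cons_cons, PySem.Chars.join_singleton]
  rw [hkw]
  have hshape : (a :: rest) ++ [] ++ ('"' :: (v.toList ++ ['"'])) = a :: ((rest ++ '"' :: v.toList) ++ ['"']) := by
    simp
  rw [hshape, pvStripEnds a _ '"' ha (by decide)]
  rw [PySem.Chars.startswith_iff]
  have hback : a :: ((rest ++ '"' :: v.toList) ++ ['"']) = (a :: rest) ++ ('"' :: v.toList ++ ['"']) := by simp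
  rw [hback, ← hkw]
  exact hpre.trans (List.prefix_append _ _)

-- first-occurrence dict: one step over the key list
theorem pvInner (s : String) (i : Nat) :
    ∀ (keys : List String), keys.Nodup → ∀ (d : PySem.Dict String Nat) (k : String),
    (keys.foldl (fun d key => if !(d.contains key) && PySem.Str.startswith s key then d.insert key i else d) d).get? k
      = if k ∈ keys ∧ d.get? k = none ∧ PySem.Str.startswith s k = true then some i else d.get? k := by
  intro keys
  induction keys with
  | nil => intro _ d k; simp
  | cons a keys ih =>
    intro hnd d k
    obtain ⟨hna, hnd'⟩ := List.nodup_cons.mp hnd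
    rw [List.foldl_cons, ih hnd']
    by_cases hka : k = a
    · subst hka
      by_cases hsw : PySem.Str.startswith s k = true
      · by_cases hc : d.contains k = true
        · have hg : ¬ d.get? k = none := by
            rw [PySem.Dict.get?_eq_none_iff_contains]; simp [hc]
          simp [hc, hna, hg]
        · have hg : d.get? k = none := (PySem.Dict.get?_eq_none_iff_contains d k).mpr (by simpa using hc)
          have hsw' : PySem.Chars.startswith s.toList k.toList = true := by simpa using hsw
          simp [hc, hsw', hna, hg, PySem.Dict.get?_insert_self]
      · have hsw' : PySem.Chars.startswith s.toList k.toList = false := by simpa using hsw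
        simp [hsw', hna]
    · have hd' : (if (!(d.contains a) && PySem.Str.startswith s a) = true then d.insert a i else d).get? k
          = d.get? k := by
        split_ifs with hc
        · exact PySem.Dict.get?_insert_of_ne d i hka
        · rfl
      rw [hd']
      simp [hka]

-- first-occurrence dict = findIdx?, over the whole enumerate pass
theorem pvOuter (lines : List String) : ∀ (n : Nat) (d : PySem.Dict String Nat) (k : String), k ∈ pvKeys →
    ((List.zipIdx lines n).foldl (fun d p =>
        pvKeys.foldl (fun d key =>
          if !(d.contains key) && PySem.Str.startswith (PySem.Str.strip p.1) key then d.insert key p.2 else d) d) d).get? k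
      = (d.get? k).or ((List.findIdx? (pvP k) lines).map (· + n)) := by
  induction lines with
  | nil => intro n d k _; simp
  | cons ln lines ih =>
    intro n d k hk
    rw [List.zipIdx_cons, List.foldl_cons, ih (n + 1) _ k hk]
    rw [pvInner (PySem.Str.strip ln) n pvKeys (by decide) d k]
    by_cases hg : d.get? k = none
    · by_cases hp : PySem.Str.startswith (PySem.Str.strip ln) k = true
      · have hp' : PySem.Chars.startswith (PySem.Chars.strip ln.toList) k.toList = true := by
          simpa [pvP] using hp
        simp [hk, hg, hp', List.findIdx?_cons, pvP]
      · have hp' : PySem.Chars.startswith (PySem.Chars.strip ln.toList) k.toList = false := by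
          simpa [pvP] using hp
        simp only [hk, hg, true_and, List.findIdx?_cons, pvP, PySem.Str.startswith_eq, PySem.Str.toList_strip, hp']
        simp only [Bool.false_eq_true, if_false, Option.none_or, Option.map_map]
        cases h : List.findIdx? (fun ln => PySem.Chars.startswith (PySem.Chars.strip ln.toList) k.toList) lines <;>
          simp [Nat.add_comm 1 n]
    · rcases Option.ne_none_iff_exists'.mp hg with ⟨v, hv⟩
      simp [hv]

-- findIdx? is unchanged by overwriting one cell with an equi-valued one
theorem pvFindIdxSet {α : Type} (p : α → Bool) :
    ∀ (l : List α) (i : Nat) (x : α) (hi : i < l.length), p x = p (l[i]'hi) →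
    List.findIdx? p (l.set i x) = List.findIdx? p l := by
  intro l
  induction l with
  | nil => intro i x hi; simp at hi
  | cons a l ih =>
    intro i x hi h
    cases i with
    | zero => simp only [List.set] ; rw [List.findIdx?_cons, List.findIdx?_cons] ; simp at h ; rw [h]
    | succ i =>
      rw [List.set_cons_succ, List.findIdx?_cons, List.findIdx?_cons]
      rw [ih i x (by simpa using hi) (by simpa using h)]

theorem pvPos0 (lines : List String) (k : String) (hk : k ∈ pvKeys) :
    ((List.zipIdx lines).foldl (fun d p =>
        pvKeys.foldl (fun d key =>
          if !(d.contains key) && PySem.Str.startswith (PySem.Str.strip p.1) key then d.insert key p.2 else d) d)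
      PySem.Dict.empty).get? k = List.findIdx? (pvP k) lines := by
  rw [pvOuter lines 0 PySem.Dict.empty k hk]
  rw [show (PySem.Dict.empty : PySem.Dict String Nat).get? k = none from rfl, Option.none_or]
  cases h : List.findIdx? (pvP k) lines <;> simp

theorem pvScanPreserve (k : String) (l : List String) (i : Nat) (hi : i < l.length) (x : String)
    (h1 : pvP k (l[i]'hi) = false) (h2 : pvP k x = false) :
    List.findIdx? (pvP k) (l.set i x) = List.findIdx? (pvP k) l :=
  pvFindIdxSet (pvP k) l i x hi (h2.trans h1.symm)

theorem pvInsertTwo (l : List String) (ia : Nat) (h : ia ≤ l.length) (x y : String) :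
    PySem.List.insert (PySem.List.insert l (↑ia) x) (↑(ia + 1)) y
      = List.take ia l ++ x :: y :: List.drop ia l := by
  rw [PySem.List.insert_natCast l ia x h]
  have hlen : (List.take ia l).length = ia := by simp [Nat.min_eq_left h]
  rw [PySem.List.insert_natCast _ (ia + 1) y
        (by rw [List.length_append, hlen, List.length_cons]; omega)]
  rw [List.take_append, List.drop_append, hlen]
  rw [List.take_of_length_le (l := List.take ia l) (by rw [hlen]; omega)]
  rw [List.drop_of_length_le (l := List.take ia l) (by rw [hlen]; omega)]
  have hsub : ia + 1 - ia = 1 := by omega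
  rw [hsub]
  simp

theorem pvAnchorLe (l : List String) (n : Nat) (hn : l.length ≤ n) :
    (match List.findIdx? (pvP "duration:") l with
     | some i => i + 1
     | none =>
       match List.findIdx? (pvP "format:") l with
       | some i => i + 1
       | none =>
         match List.findIdx? (pvP "status:") l with
         | some i => i + 1
         | none => n) ≤ n := by
  cases hd : List.findIdx? (pvP "duration:") l with
  | some a => obtain ⟨ha, -, -⟩ := List.findIdx?_eq_some_iff_getElem.mp hd; dsimp only; exact Nat.succ_le_of_lt (Nat.lt_of_lt_of_le ha hn)
  | none =>
    cases hf : List.findIdx? (pvP "format:") l with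
    | some a => obtain ⟨ha, -, -⟩ := List.findIdx?_eq_some_iff_getElem.mp hf; dsimp only; exact Nat.succ_le_of_lt (Nat.lt_of_lt_of_le ha hn)
    | none =>
      cases hst : List.findIdx? (pvP "status:") l with
      | some a => obtain ⟨ha, -, -⟩ := List.findIdx?_eq_some_iff_getElem.mp hst; dsimp only; exact Nat.succ_le_of_lt (Nat.lt_of_lt_of_le ha hn)
      | none => dsimp only; exact le_refl n

-- ===== VERDICT (by name: the statement is the Claim_ definition above) =====
set_option maxHeartbeats 1000000 in
theorem set_or_insert_dates_spec : Claim_equal_set_or_insert_dates := by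
  intro fm_text start_iso end_iso _
  unfold Spec_set_or_insert_dates
  simp only [set_or_insert_dates, set_or_insert_dates_alt]
  generalize PySem.Str.splitlines fm_text = lines
  rw [pvPos0 lines "start_date:" (by decide), pvPos0 lines "end_date:" (by decide),
      pvPos0 lines "duration:" (by decide), pvPos0 lines "format:" (by decide),
      pvPos0 lines "status:" (by decide)]
  have hP : ∀ k : String, (fun ln => PySem.Str.startswith (PySem.Str.strip ln) k) = pvP k := fun _ => rfl
  simp only [hP, pvFmt_eq, and_comm]
  cases hs : List.findIdx? (pvP "start_date:") lines with
  | none =>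
    cases he : List.findIdx? (pvP "end_date:") lines with
    | none =>
      dsimp only
      have hia := pvAnchorLe lines lines.length (le_refl _)
      refine congrArg _ ?_
      rw [pvInsertTwo lines _ hia]
      simp
    | some j =>
      dsimp only
      obtain ⟨hj, hpj, -⟩ := List.findIdx?_eq_some_iff_getElem.mp he
      have hne : pvP "end_date:" (PySem.Str.join "" ["end_date: ", pvFmtB end_iso]) = true :=
        pvP_new "end_date:" "end_date: " end_iso 'e' ("nd_date: ".toList) (by decide) (by decide) (by decide)
      by_cases hc : end_iso ≠ "" ∧ get_value (lines.getD j "") = ""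
      · rw [if_pos hc]
        rw [pvScanPreserve "duration:" lines j hj _
              (pvExcl "end_date:" "duration:" _ (by decide) (by decide) hpj)
              (pvExcl "end_date:" "duration:" _ (by decide) (by decide) hne),
            pvScanPreserve "format:" lines j hj _
              (pvExcl "end_date:" "format:" _ (by decide) (by decide) hpj)
              (pvExcl "end_date:" "format:" _ (by decide) (by decide) hne),
            pvScanPreserve "status:" lines j hj _
              (pvExcl "end_date:" "status:" _ (by decide) (by decide) hpj)
              (pvExcl "end_date:" "status:" _ (by decide) (by decide) hne)]
        have hia := pvAnchorLe lines (lines.set j (PySem.Str.join "" ["end_date: ", pvFmtB end_iso])).length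
          (by simp)
        refine congrArg _ ?_
        rw [PySem.List.insert_natCast _ _ _ hia]
        simp
      · rw [if_neg hc]
        have hia := pvAnchorLe lines lines.length (le_refl _)
        refine congrArg _ ?_
        rw [PySem.List.insert_natCast _ _ _ hia]
        simp
  | some i =>
    cases he : List.findIdx? (pvP "end_date:") lines with
    | none =>
      dsimp only
      obtain ⟨hi, hpi, -⟩ := List.findIdx?_eq_some_iff_getElem.mp hs
      have hns : pvP "start_date:" (PySem.Str.join "" ["start_date: ", pvFmtB start_iso]) = true :=
        pvP_new "start_date:" "start_date: " start_iso 's' ("tart_date: ".toList) (by decide) (by decide) (by decide)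
      by_cases hc : start_iso ≠ "" ∧ get_value (lines.getD i "") = ""
      · rw [if_pos hc]
        rw [pvScanPreserve "duration:" lines i hi _
              (pvExcl "start_date:" "duration:" _ (by decide) (by decide) hpi)
              (pvExcl "start_date:" "duration:" _ (by decide) (by decide) hns),
            pvScanPreserve "format:" lines i hi _
              (pvExcl "start_date:" "format:" _ (by decide) (by decide) hpi)
              (pvExcl "start_date:" "format:" _ (by decide) (by decide) hns),
            pvScanPreserve "status:" lines i hi _
              (pvExcl "start_date:" "status:" _ (by decide) (by decide) hpi)
              (pvExcl "start_date:" "status:" _ (by decide) (by decide) hns)]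
        have hia := pvAnchorLe lines (lines.set i (PySem.Str.join "" ["start_date: ", pvFmtB start_iso])).length
          (by simp)
        refine congrArg _ ?_
        rw [PySem.List.insert_natCast _ _ _ hia]
        simp
      · rw [if_neg hc]
        have hia := pvAnchorLe lines lines.length (le_refl _)
        refine congrArg _ ?_
        rw [PySem.List.insert_natCast _ _ _ hia]
        simp
    | some j =>
      dsimp only
      refine congrArg _ ?_
      simp [List.take_append_drop]
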